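-- pv_equiv track=rewrite | github.com/valentinthourte/tp-algoritmos1 | consulta_de_funciones.py | generar_lista_total
-- ===== SOURCE A (Python) =====
-- def generar_lista_total(diccionario_fuente, nombre):
--     """[Autor: Valentin]
--     [Ayuda: Genera una lista de listas con los nombres de las funciones ordenadas alfabeticamente]
--     """
--     lista_total = [[]]
--     #Añado los nombres de funciones del diccionario a una lista de listas, para imprimir ordenado
--     espacio = "<" + str(nombre) + "s"
--     for i in diccionario_fuente:
--         ultima_lista = lista_total[-1]
--         if len(ultima_lista) < 5:
--             ultima_lista.append(format(i, espacio))
--         else: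
--             lista_total.append([])
--             ultima_lista = lista_total[-1]
--             ultima_lista.append(format(i, espacio))
--     #Verifico si la ultima lista generada tiene menos de 5 elementos, para formatear espacios y que quede parejo
--     if len(lista_total[-1]) < 5:
--         for i in range(0, 5-len(lista_total[-1])):
--             lista_total[-1].append(format(" ", espacio))
--     return lista_total
-- ===== SOURCE B (Python) =====
-- def generar_lista_total(diccionario_fuente, nombre):
--     espacio = "<" + str(nombre) + "s"
--     formatted = [format(k, espacio) for k in diccionario_fuente]
--     filas = [formatted[i:i+5] for i in range(0, len(formatted), 5)]
--     if not filas: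
--         filas = [[]]
--     relleno = format(" ", espacio)
--     filas[-1] = filas[-1] + [relleno] * (5 - len(filas[-1]))
--     return filas
-- ===== Notes on version B (the rewrite author's own statement) =====
-- stated objective: idiomatic
-- what changed: Replaces A's stateful grow-the-last-row loop and element-by-element padding loop with a flat format-then-slice decomposition: format all keys, chunk by list slicing over range(0, len, 5), and pad the last row with list multiplication.
import Mathlib
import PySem

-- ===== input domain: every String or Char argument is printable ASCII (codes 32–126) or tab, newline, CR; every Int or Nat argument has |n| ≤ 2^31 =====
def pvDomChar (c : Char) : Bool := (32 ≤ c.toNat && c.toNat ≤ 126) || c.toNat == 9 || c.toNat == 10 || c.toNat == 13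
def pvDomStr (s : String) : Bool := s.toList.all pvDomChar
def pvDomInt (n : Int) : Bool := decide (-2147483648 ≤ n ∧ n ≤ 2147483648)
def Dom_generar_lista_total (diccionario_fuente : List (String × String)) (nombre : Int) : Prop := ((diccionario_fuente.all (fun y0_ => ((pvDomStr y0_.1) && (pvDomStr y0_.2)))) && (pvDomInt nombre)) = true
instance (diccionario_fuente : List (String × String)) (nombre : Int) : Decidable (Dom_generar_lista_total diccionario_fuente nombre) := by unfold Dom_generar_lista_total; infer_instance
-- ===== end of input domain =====

-- B re-decomposes A's stateful row-growing loop as format-all, slice-chunk, pad-last (idiomatic, same cost).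
-- Equivalence is about the RETURN value; neither program mutates its arguments.

-- Hand port of Python's format(s, "<" ++ str(n) ++ "s"): left-justify s in a field of
-- width n, padding with spaces. Exact for n ≥ 0 (Pre_); for n < 0 Python raises ValueError.
def pyFormatLjust (n : Int) (s : String) : String :=
  String.mk (s.toList ++ List.replicate (n.toNat - s.toList.length) ' ')

-- ===== PORT A =====
-- the body of A's `for i in diccionario_fuente` loop (appending to a list held in a
-- Python variable is modelled as dropLast ++ [... ++ [new element]])
def stepA (f : String → String) (lt : List (List String)) (i : String) : List (List String) :=
  let ultima := lt.getLastD []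
  if ultima.length < 5 then
    lt.dropLast ++ [ultima ++ [f i]]                                -- ultima_lista.append(...)
  else
    let lt' := lt ++ [([] : List String)]                           -- lista_total.append([])
    lt'.dropLast ++ [lt'.getLastD [] ++ [f i]]

-- `for i in diccionario_fuente` iterates the dict's keys: first occurrences, in order.
def generar_lista_total (diccionario_fuente : List (String × String)) (nombre : Int) : List (List String) :=
  let keys := PySem.Set.ofList (diccionario_fuente.map Prod.fst)
  let lista_total : List (List String) := keys.foldl (stepA (pyFormatLjust nombre)) [[]]
  let ultima := lista_total.getLastD []
  if ultima.length < 5 then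
    (PySem.List.pyRange 0 (5 - (ultima.length : Int)) 1).foldl
      (fun lt _ => lt.dropLast ++ [lt.getLastD [] ++ [pyFormatLjust nombre " "]]) lista_total
  else lista_total

-- ===== PORT B =====
def generar_lista_total_alt (diccionario_fuente : List (String × String)) (nombre : Int) : List (List String) :=
  let formatted := (PySem.Set.ofList (diccionario_fuente.map Prod.fst)).map (pyFormatLjust nombre)
  let filas := (PySem.List.pyRange 0 (PySem.List.len formatted) 5).map
      (fun i => PySem.List.slice formatted (some i) (some (i + 5)))
  let filas := if filas = [] then [[]] else filas
  let relleno := pyFormatLjust nombre " "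
  filas.dropLast ++ [filas.getLastD [] ++ List.replicate (5 - (filas.getLastD []).length) relleno]

-- ===== PRECONDITION & SPEC =====
-- Pre_: for nombre < 0 the format spec "<-ks" is invalid and Python A raises ValueError
-- (the final padding runs even on an empty dict, so every nombre < 0 raises); B raises there too.
def Pre_generar_lista_total (diccionario_fuente : List (String × String)) (nombre : Int) : Prop :=
  0 ≤ nombre
instance (diccionario_fuente : List (String × String)) (nombre : Int) : Decidable (Pre_generar_lista_total diccionario_fuente nombre) := by unfold Pre_generar_lista_total; infer_instance
def pvWitness_generar_lista_total : (List (String × String)) × Int := ([("ayuda", "doc"), ("cargar", "doc2")], 8)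
def Spec_generar_lista_total (diccionario_fuente : List (String × String)) (nombre : Int) (out : List (List String)) : Prop := out = generar_lista_total_alt diccionario_fuente nombre
instance (diccionario_fuente : List (String × String)) (nombre : Int) (out : List (List String)) : Decidable (Spec_generar_lista_total diccionario_fuente nombre out) := by unfold Spec_generar_lista_total; infer_instance

-- ===== CLAIM (what is proved, stated in full; the proofs are below) =====
def Claim_equal_generar_lista_total : Prop := ∀ (diccionario_fuente : List (String × String)) (nombre : Int), Dom_generar_lista_total diccionario_fuente nombre → Pre_generar_lista_total diccionario_fuente nombre → Spec_generar_lista_total diccionario_fuente nombre (generar_lista_total diccionario_fuente nombre)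

-- ===== LEMMAS AND PROOFS =====

theorem pyRange5_cons (n : Int) (h : 0 < n) :
    PySem.List.pyRange 0 n 5 = 0 :: (PySem.List.pyRange 0 (n - 5) 5).map (· + 5) := by
  rw [PySem.List.pyRange_of_pos _ _ (by norm_num : (0:Int) < 5),
      PySem.List.pyRange_of_pos _ _ (by norm_num : (0:Int) < 5)]
  by_cases h5 : 5 < n
  · have ht : ((n - 0 + 5 - 1) / 5).toNat = ((n - 5 - 0 + 5 - 1) / 5).toNat + 1 := by omega
    rw [if_pos h, if_pos (by omega), ht, List.range_succ_eq_map, List.map_cons, List.map_map, List.map_map]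
    norm_num
    intro a _
    ring
  · have ht : ((n - 0 + 5 - 1) / 5).toNat = 1 := by omega
    rw [if_pos h, if_neg (by omega), ht]
    simp [List.range_succ]

-- rows l = the chunks of l in groups of 5 (last group 1..5 long; [] for []).
def rows : List String → List (List String)
  | [] => []
  | x :: xs => ((x :: xs).take 5) :: rows ((x :: xs).drop 5)
termination_by l => l.length
decreasing_by simp

theorem rows_nil : rows [] = [] := by unfold rows; rfl
theorem rows_cons (x : String) (xs : List String) :
    rows (x :: xs) = ((x :: xs).take 5) :: rows ((x :: xs).drop 5) := by rw [rows.eq_def]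

theorem chunksB_eq_rows (l : List String) :
    (PySem.List.pyRange 0 (PySem.List.len l) 5).map
      (fun i => PySem.List.slice l (some i) (some (i + 5))) = rows l := by
  induction hn : l.length using Nat.strong_induction_on generalizing l with
  | _ n ih =>
  cases l with
  | nil =>
    rw [PySem.List.len_eq]
    rw [show ((([] : List String).length : Int) = 0) by simp,
        PySem.List.pyRange_of_pos 0 0 (by norm_num), if_neg (by omega)]
    simp [rows_nil]
  | cons x xs =>
    rw [PySem.List.len_eq]
    have hpos : (0:Int) < ((x :: xs).length : Int) := by simp only [List.length_cons]; omega
    rw [pyRange5_cons _ hpos, List.map_cons, List.map_map]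
    have hhead : PySem.List.slice (x :: xs) (some 0) (some (0 + 5)) = (x :: xs).take 5 := by
      rw [PySem.List.slice_toNat _ le_rfl (by norm_num)]; rfl
    have htail : ((PySem.List.pyRange 0 (((x :: xs).length : Int) - 5) 5).map
        ((fun i => PySem.List.slice (x :: xs) (some i) (some (i + 5))) ∘ (· + 5)))
        = rows ((x :: xs).drop 5) := by
      have hmap : ∀ i ∈ PySem.List.pyRange 0 (((x :: xs).length : Int) - 5) 5,
          ((fun i => PySem.List.slice (x :: xs) (some i) (some (i + 5))) ∘ (· + 5)) i
          = PySem.List.slice ((x :: xs).drop 5) (some i) (some (i + 5)) := by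
        intro i hi
        have hi0 : 0 ≤ i := ((PySem.List.mem_pyRange_iff_of_pos (by norm_num) i).1 hi).1
        have e1 : (i + 5).toNat = i.toNat + 5 := by omega
        have e2 : (i + 5 + 5).toNat = i.toNat + 10 := by omega
        simp only [Function.comp_apply]
        rw [PySem.List.slice_toNat (x :: xs) (a := i + 5) (b := i + 5 + 5) (by omega) (by omega),
            PySem.List.slice_toNat ((x :: xs).drop 5) (a := i) (b := i + 5) hi0 (by omega),
            List.drop_drop, e1, e2]
        congr 1
        · omega
        · rw [Nat.add_comm]
      rw [List.map_congr_left hmap]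
      by_cases h5 : (x :: xs).length ≤ 5
      · have hd : (x :: xs).drop 5 = [] := List.drop_eq_nil_of_le h5
        rw [PySem.List.pyRange_of_pos _ _ (by norm_num : (0:Int) < 5), if_neg (by omega), hd]
        simp [rows_nil]
      · have hlen : (((x :: xs).length : Int) - 5) = PySem.List.len ((x :: xs).drop 5) := by
          rw [PySem.List.len_eq]
          simp only [List.length_drop]
          omega
        rw [hlen]
        exact ih ((x :: xs).drop 5).length (by subst hn; simp only [List.length_drop, List.length_cons]; omega) _ rfl
    rw [hhead, htail, rows_cons]

-- fill c l = A's row-growing loop, current (not yet closed) row c, remaining items l.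
def fill (c : List String) : List String → List (List String)
  | [] => [c]
  | x :: xs => if c.length < 5 then fill (c ++ [x]) xs else c :: fill [x] xs

theorem concat_getLastD {α : Type} (M : List α) (d : α) (h : M ≠ []) :
    M.dropLast ++ [M.getLastD d] = M := by
  induction M with
  | nil => exact absurd rfl h
  | cons x xs ih =>
    cases xs with
    | nil => simp
    | cons y ys => simpa using ih (by simp)

theorem foldA_eq_fill (f : String → String) (l : List String) :
    ∀ (cs : List (List String)) (c : List String),
    l.foldl (stepA f) (cs ++ [c]) = cs ++ fill c (l.map f) := by
  induction l with
  | nil => intro cs c; simp [fill]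
  | cons x xs ih =>
    intro cs c
    rw [List.foldl_cons]
    by_cases h : c.length < 5
    · have hs : stepA f (cs ++ [c]) x = cs ++ [c ++ [f x]] := by
        simp [stepA, h]
      rw [hs, List.map_cons, fill, if_pos h]
      exact ih cs (c ++ [f x])
    · have hs : stepA f (cs ++ [c]) x = (cs ++ [c]) ++ [[f x]] := by
        simp [stepA, h]
      rw [hs, List.map_cons, fill, if_neg h]
      simpa [List.append_assoc] using ih (cs ++ [c]) [f x]

theorem fill_eq_rows (l : List String) : ∀ (c : List String), c.length ≤ 5 →
    fill c l = (c ++ l.take (5 - c.length)) :: rows (l.drop (5 - c.length)) := by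
  induction l with
  | nil => intro c _; simp [fill, rows_nil]
  | cons x xs ih =>
    intro c hc
    by_cases h : c.length < 5
    · obtain ⟨k, hk⟩ : ∃ k, 5 - c.length = k + 1 := ⟨4 - c.length, by omega⟩
      have hk' : 5 - (c ++ [x]).length = k := by simp; omega
      rw [fill, if_pos h, ih (c ++ [x]) (by simp; omega), hk', hk]
      simp [List.take_succ_cons, List.drop_succ_cons]
    · have h0 : 5 - c.length = 0 := by omega
      rw [fill, if_neg h, ih [x] (by simp), h0]
      simp [rows_cons]

theorem padLoop_eq (p : String) (M : List (List String)) (hM : M ≠ []) (k : Nat) :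
    (PySem.List.pyRange 0 (k : Int) 1).foldl
      (fun lt _ => lt.dropLast ++ [lt.getLastD [] ++ [p]]) M
    = M.dropLast ++ [M.getLastD [] ++ List.replicate k p] := by
  induction k with
  | zero =>
    rw [PySem.List.pyRange_one_eq_nil (by norm_num)]
    simp only [List.foldl_nil, List.replicate_zero, List.append_nil]
    exact (concat_getLastD M [] hM).symm
  | succ k ih =>
    have hc : ((k : Int) + 1) = ((k + 1 : Nat) : Int) := by push_cast; ring
    rw [← hc, PySem.List.pyRange_one_succ_right (by positivity), List.foldl_append, ih]
    simp [List.replicate_succ', List.append_assoc]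

theorem generar_eq (diccionario_fuente : List (String × String)) (nombre : Int) :
    generar_lista_total diccionario_fuente nombre = generar_lista_total_alt diccionario_fuente nombre := by
  unfold generar_lista_total generar_lista_total_alt
  dsimp only
  set f := pyFormatLjust nombre with hf
  set ks := PySem.Set.ofList (diccionario_fuente.map Prod.fst) with hks
  set L : List String := ks.map f with hL
  -- A's loop result
  have hfoldl : ks.foldl (stepA f) [[]] = L.take 5 :: rows (L.drop 5) := by
    have h1 := foldA_eq_fill f ks [] []
    rw [List.nil_append] at h1
    rw [h1, ← hL, fill_eq_rows L [] (by simp)]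
    simp
  -- B's chunks
  have hchunks : ((PySem.List.pyRange 0 (PySem.List.len L) 5).map
      (fun i => PySem.List.slice L (some i) (some (i + 5)))) = rows L := chunksB_eq_rows L
  have hMB : (if (rows L) = [] then ([[]] : List (List String)) else rows L)
      = L.take 5 :: rows (L.drop 5) := by
    cases hl : L with
    | nil => simp [rows_nil]
    | cons y ys =>
      rw [if_neg (by rw [rows_cons]; simp), rows_cons]
  rw [hfoldl, hchunks, hMB]
  set M : List (List String) := L.take 5 :: rows (L.drop 5) with hM
  have hMne : M ≠ [] := by simp [hM]
  -- final padding
  set u := M.getLastD [] with hu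
  set p := f " " with hp
  by_cases h : u.length < 5
  · have hk : (5 - (u.length : Int)) = ((5 - u.length : Nat) : Int) := by omega
    rw [if_pos h, hk, padLoop_eq p M hMne]
  · have h0 : 5 - u.length = 0 := by omega
    rw [if_neg h, h0]
    simp only [List.replicate_zero, List.append_nil]
    exact (concat_getLastD M [] hMne).symm

-- ===== VERDICT (by name: the statement is the Claim_ definition above) =====
theorem generar_lista_total_spec : Claim_equal_generar_lista_total := by
  intro df n _ _
  unfold Spec_generar_lista_total
  exact generar_eq df n
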